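-- pv_equiv track=rewrite | github.com/benvarela/edf_to_csv_seizelt2 | src/features.py | process_run_indexes
-- ===== SOURCE A (Python) =====
-- def process_run_indexes(run_ends: list) -> list:
--     '''
--     Breifly preprocess run indexes, so the start and end index of runs is output in a list, as oppoosed to just the end indexes
--     Note that these indexes are prepared to work immediately with slice notation; +1/-1 business has already been thought of and accounted for
--
--     INPUT: run_ends: list of all the indexes for when a run ends
--     OUTPUT: out: list containing lists of [i_start, i_end] for each run
--     '''
--     # Initialise output list, length and negative indexes to iterate over
--     out = list()
--     for i in range(len(run_ends)):
--         # Add the start and end indexes sequentially to the new output list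
--         if i == 0:
--             out.append([0, run_ends[i]])
--         else:
--             out.append([run_ends[i-1], run_ends[i]])
--     return out
-- ===== SOURCE B (Python) =====
-- def process_run_indexes(run_ends: list) -> list:
--     # Phase 1: build the flat boundary sequence 0, e0, e0, e1, e1, ..., e_last
--     # (every run end is both an end boundary and the next run's start boundary).
--     flat = [0]
--     for e in run_ends:
--         flat.append(e)
--         flat.append(e)
--     flat.pop()  # the last end is not the start of a further run
--     # Phase 2: chunk the flat boundary sequence into consecutive pairs.
--     it = iter(flat)
--     return [[a, b] for a, b in zip(it, it)]
-- ===== Notes on version B (the rewrite author's own statement) =====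
-- stated objective: alternative
-- what changed: Instead of an indexed loop with an i==0 branch looking back at run_ends[i-1], B builds the flat boundary sequence (0 followed by every end duplicated, last duplicate popped) and then chunks that sequence into consecutive pairs.
import Mathlib
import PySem

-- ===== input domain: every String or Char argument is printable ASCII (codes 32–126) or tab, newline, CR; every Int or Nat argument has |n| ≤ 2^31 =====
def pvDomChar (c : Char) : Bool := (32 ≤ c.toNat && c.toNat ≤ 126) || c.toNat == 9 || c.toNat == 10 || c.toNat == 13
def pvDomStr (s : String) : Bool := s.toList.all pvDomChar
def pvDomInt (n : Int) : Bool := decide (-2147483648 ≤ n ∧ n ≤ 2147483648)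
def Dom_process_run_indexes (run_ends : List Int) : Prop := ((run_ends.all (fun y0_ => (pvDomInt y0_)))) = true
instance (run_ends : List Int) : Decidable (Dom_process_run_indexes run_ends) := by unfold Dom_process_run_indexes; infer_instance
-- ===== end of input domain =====

-- B builds the duplicated boundary sequence and chunks it into pairs; same values as A (alternative decomposition, no speed claim).

-- ===== PORT A =====
-- Transliteration of A: loop over range(len(run_ends)), append [0,e] at i=0 else [prev,e]
def process_run_indexes (run_ends : List Int) : List (List Int) :=
  (PySem.List.pyRange 0 (run_ends.length : Int) 1).foldl
    (fun out i =>
      if i = 0 then out ++ [[0, PySem.List.pyGetD run_ends i 0]]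
      else out ++ [[PySem.List.pyGetD run_ends (i - 1) 0, PySem.List.pyGetD run_ends i 0]]) []

-- ===== PORT B =====
-- port of '[[a, b] for a, b in zip(it, it)]' where it = iter(flat): consecutive pair chunking
def pvChunk2 : List Int → List (List Int)
  | a :: b :: t => [a, b] :: pvChunk2 t
  | _ => []

-- Transliteration of B: flat = [0]; for e: append e twice; flat.pop(); chunk into pairs
def process_run_indexes_alt (run_ends : List Int) : List (List Int) :=
  let flat : List Int := run_ends.foldl (fun acc e => acc ++ [e, e]) [0]
  pvChunk2 flat.dropLast

-- ===== PRECONDITION & SPEC =====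
def Spec_process_run_indexes (run_ends : List Int) (out : List (List Int)) : Prop := out = process_run_indexes_alt run_ends
instance (run_ends : List Int) (out : List (List Int)) : Decidable (Spec_process_run_indexes run_ends out) := by unfold Spec_process_run_indexes; infer_instance

-- ===== CLAIM (what is proved, stated in full; the proofs are below) =====
def Claim_equal_process_run_indexes : Prop := ∀ (run_ends : List Int), Dom_process_run_indexes run_ends → Spec_process_run_indexes run_ends (process_run_indexes run_ends)

-- ===== LEMMAS AND PROOFS =====

lemma pv_zip_getElem (xs : List Int) (n : Nat) (hn : n < xs.length) :
    ((0 :: xs.dropLast).zip xs)[n]'(by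
      simp [List.length_zip, List.length_dropLast]; omega) =
    ((0 :: xs.dropLast)[n]'(by simp [List.length_dropLast]; omega), xs[n]) := by
  exact List.getElem_zip

lemma pv_loop (xs : List Int) (n : Nat) (hn : n ≤ xs.length) :
    (PySem.List.pyRange 0 (n : Int) 1).foldl
      (fun out i =>
        if i = 0 then out ++ [[0, PySem.List.pyGetD xs i 0]]
        else out ++ [[PySem.List.pyGetD xs (i - 1) 0, PySem.List.pyGetD xs i 0]]) [] =
    (((0 :: xs.dropLast).zip xs).take n).map (fun p => [p.1, p.2]) := by
  induction n with
  | zero => simp [PySem.List.pyRange_one_eq_nil]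
  | succ n ih =>
    have hlt : n < xs.length := by omega
    have hz : n < ((0 :: xs.dropLast).zip xs).length := by
      simp [List.length_zip, List.length_dropLast]; omega
    have hr : PySem.List.pyRange 0 ((n + 1 : Nat) : Int) 1
        = PySem.List.pyRange 0 (n : Int) 1 ++ [(n : Int)] := by
      push_cast
      exact PySem.List.pyRange_one_succ_right (by positivity)
    rw [hr, List.foldl_append, ih (by omega)]
    have htake : ((0 :: xs.dropLast).zip xs).take (n + 1)
        = ((0 :: xs.dropLast).zip xs).take n ++ [((0 :: xs.dropLast).zip xs)[n]] := by
      rw [List.take_add_one, List.getElem?_eq_getElem hz]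
      simp
    rw [htake, List.map_append]
    simp only [List.foldl_cons, List.foldl_nil, List.map_cons, List.map_nil]
    rw [pv_zip_getElem xs n hlt]
    rcases Nat.eq_zero_or_pos n with h0 | hpos
    · subst h0
      simp [PySem.List.pyGetD_zero, List.getElem?_eq_getElem hlt]
    · have hne : (n : Int) ≠ 0 := by exact_mod_cast Nat.pos_iff_ne_zero.mp hpos
      have h1 : PySem.List.pyGetD xs ((n : Int) - 1) 0 = xs[n - 1]'(by omega) := by
        have : ((n : Int) - 1) = ((n - 1 : Nat) : Int) := by omega
        rw [this, PySem.List.pyGetD_natCast]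
        exact List.getD_eq_getElem _ _ (by omega)
      have h2 : PySem.List.pyGetD xs (n : Int) 0 = xs[n] := by
        rw [PySem.List.pyGetD_natCast]; exact List.getD_eq_getElem _ _ hlt
      have h3 : (0 :: xs.dropLast)[n]'(by simp [List.length_dropLast]; omega)
          = xs[n - 1]'(by omega) := by
        rcases n with _ | m
        · omega
        · simp [List.getElem_dropLast]
      rw [if_neg hne]
      simp [h1, h2, h3]

-- the appending loop builds acc ++ every element duplicated
lemma pv_flat (xs : List Int) (acc : List Int) :
    xs.foldl (fun acc e => acc ++ [e, e]) acc = acc ++ xs.flatMap (fun e => [e, e]) := by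
  induction xs generalizing acc with
  | nil => simp
  | cons e t ih => simp [List.foldl_cons, ih, List.flatMap_cons]

-- chunking the flat boundary sequence (prev boundary p, duplicated ends, last dropped) = zip-with-shift
lemma pv_chunk (xs : List Int) (p : Int) :
    pvChunk2 ((p :: xs.flatMap (fun x => [x, x])).dropLast) =
    ((p :: xs.dropLast).zip xs).map (fun q => [q.1, q.2]) := by
  induction xs generalizing p with
  | nil => simp [pvChunk2]
  | cons e t ih =>
    cases t with
    | nil => simp [pvChunk2]
    | cons e2 t2 =>
      have h1 : p :: (e :: e2 :: t2).flatMap (fun x => [x, x])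
          = p :: e :: e :: ((e2 :: t2).flatMap (fun x => [x, x])) := by simp
      rw [h1]
      rw [List.dropLast_cons_of_ne_nil (l := e :: e :: (e2 :: t2).flatMap (fun x => [x, x])) (by simp)]
      rw [List.dropLast_cons_of_ne_nil (l := e :: (e2 :: t2).flatMap (fun x => [x, x])) (by simp)]
      rw [show pvChunk2 (p :: e :: ((e :: (e2 :: t2).flatMap (fun x => [x, x])).dropLast))
          = [p, e] :: pvChunk2 ((e :: (e2 :: t2).flatMap (fun x => [x, x])).dropLast) from rfl]
      rw [ih e]
      simp [List.dropLast_cons_of_ne_nil]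

-- ===== VERDICT (by name: the statement is the Claim_ definition above) =====
theorem process_run_indexes_spec : Claim_equal_process_run_indexes := by
  intro xs _
  unfold Spec_process_run_indexes process_run_indexes process_run_indexes_alt
  rw [pv_loop xs xs.length le_rfl]
  rw [List.take_of_length_le (by simp [List.length_zip, List.length_dropLast])]
  show _ = pvChunk2 ((xs.foldl (fun acc e => acc ++ [e, e]) [0]).dropLast)
  rw [pv_flat xs [0]]
  rw [show ([0] ++ xs.flatMap (fun e => [e, e])) = (0 :: xs.flatMap (fun e => [e, e])) by simp]
  rw [pv_chunk xs 0]
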